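-- pv_equiv track=rewrite | github.com/macknightway/group8_COT5405 | divide.py | bit_flip
-- ===== SOURCE A (Python) =====
-- def bit_flip(bin_data):
--     flipped_data = ''
--     for i in range(len(bin_data)):
--         if bin_data[-(i+1)] == '0':
--             flipped_data = '1' + flipped_data
--         else:
--             if (i+1) == len(bin_data):
--                 # We are at the msb
--                 flipped_data = '0' + flipped_data
--             else:
--                 # We are not at the msb (make sure to keep all leftmost bits)
--                 flipped_data = bin_data[:-(i+1)] + '0' + flipped_data
--                 break
--     return flipped_data
-- ===== SOURCE B (Python) =====
-- def bit_flip(bin_data):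
--     stripped = bin_data.rstrip('0')
--     if not stripped:
--         return '1' * len(bin_data)
--     return stripped[:-1] + '0' + '1' * (len(bin_data) - len(stripped))
-- ===== Notes on version B (the rewrite author's own statement) =====
-- stated objective: simpler
-- what changed: Replaces A's right-to-left bit-by-bit scan with repeated string prepending by a single trailing-zero strip (rstrip) that finds the flip boundary, plus one slice-and-concatenate construction.
import Mathlib
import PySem

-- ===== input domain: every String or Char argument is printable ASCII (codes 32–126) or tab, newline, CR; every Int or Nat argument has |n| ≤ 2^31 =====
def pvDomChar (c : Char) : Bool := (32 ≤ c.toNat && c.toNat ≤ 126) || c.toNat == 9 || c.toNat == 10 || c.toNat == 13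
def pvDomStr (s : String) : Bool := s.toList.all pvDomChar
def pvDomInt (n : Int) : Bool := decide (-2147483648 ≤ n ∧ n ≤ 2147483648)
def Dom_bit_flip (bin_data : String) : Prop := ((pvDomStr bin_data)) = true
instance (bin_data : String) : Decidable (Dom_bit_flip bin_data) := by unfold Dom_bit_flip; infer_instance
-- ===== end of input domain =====

-- B computes the flip boundary once (a trailing-zero rstrip) and builds the answer by one concatenation,
-- instead of A's right-to-left bit-by-bit scan with repeated prepends; return values agree everywhere.

-- ===== PORT A =====
-- the for-loop over range(len(bin_data)) with its break, as structural recursion on i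
def bitFlipLoop (l : List Char) (i : Nat) (acc : List Char) : List Char :=
  if i < l.length then
    match PySem.List.pyGet? l (-((i : Int) + 1)) with
    | some c =>
      if c = '0' then bitFlipLoop l (i + 1) ('1' :: acc)
      else if i + 1 = l.length then bitFlipLoop l (i + 1) ('0' :: acc)
      else PySem.List.slice l none (some (-((i : Int) + 1))) ++ '0' :: acc
    | none => acc   -- unreachable: the index -(i+1) is always in range for i < len
  else acc
termination_by l.length - i

def bit_flip (bin_data : String) : String :=
  String.ofList (bitFlipLoop bin_data.toList 0 [])

-- ===== PORT B =====
def bit_flip_alt (bin_data : String) : String :=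
  let l := bin_data.toList
  let stripped := l.rdropWhile (· == '0')        -- the trailing-zero rstrip of bin_data
  if stripped = [] then String.ofList (List.replicate l.length '1')
  else String.ofList (stripped.dropLast ++ '0' :: List.replicate (l.length - stripped.length) '1')

-- ===== PRECONDITION & SPEC =====
def Spec_bit_flip (bin_data : String) (out : String) : Prop := out = bit_flip_alt bin_data
instance (bin_data : String) (out : String) : Decidable (Spec_bit_flip bin_data out) := by unfold Spec_bit_flip; infer_instance

-- ===== CLAIM (what is proved, stated in full; the proofs are below) =====
def Claim_equal_bit_flip : Prop := ∀ (bin_data : String), Dom_bit_flip bin_data → Spec_bit_flip bin_data (bit_flip bin_data)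

-- ===== LEMMAS AND PROOFS =====

-- closed form of the loop's result given the still-unscanned prefix p and the accumulator
def flipAux (p : List Char) (acc : List Char) : List Char :=
  let st := p.rdropWhile (· == '0')
  if st = [] then List.replicate p.length '1' ++ acc
  else st.dropLast ++ '0' :: (List.replicate (p.length - st.length) '1' ++ acc)

lemma loop_eq (p : List Char) : ∀ (rest acc : List Char), (∀ c ∈ rest, c = '0') →
    bitFlipLoop (p ++ rest) rest.length acc = flipAux p acc := by
  induction p using List.reverseRecOn with
  | nil =>
    intro rest acc _
    rw [bitFlipLoop]
    simp [flipAux]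
  | append_singleton q c ih =>
    intro rest acc hrest
    rw [bitFlipLoop]
    have hlen : ((q ++ [c]) ++ rest).length = q.length + 1 + rest.length := by
      simp; omega
    have hi : rest.length < ((q ++ [c]) ++ rest).length := by omega
    have hget : PySem.List.pyGet? ((q ++ [c]) ++ rest) (-((rest.length : Int) + 1))
        = some c := by
      have h1 : (-((rest.length : Int) + 1)) = -(((rest.length + 1 : Nat) : Int)) := by
        push_cast; ring
      rw [h1, PySem.List.pyGet?_neg_natCast _ (rest.length + 1) (by omega) (by omega)]
      have h2 : ((q ++ [c]) ++ rest).length - (rest.length + 1) = q.length := by omega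
      rw [h2]
      rw [List.append_assoc]
      rw [List.getElem?_append_right (by omega)]
      simp
    rw [hget]
    rw [if_pos hi]
    by_cases hc : c = '0'
    · subst hc
      dsimp only
      rw [if_pos rfl]
      have hrest' : ∀ x ∈ ('0' :: rest), x = '0' := by
        intro x hx
        rcases List.mem_cons.mp hx with rfl | hx
        · rfl
        · exact hrest _ hx
      have := ih ('0' :: rest) ('1' :: acc) hrest'
      have hA : (q ++ ['0']) ++ rest = q ++ ('0' :: rest) := by simp
      have hL : ('0' :: rest).length = rest.length + 1 := rfl
      rw [hA, ← hL, this]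
      -- flipAux (q ++ ['0']) acc = flipAux q ('1' :: acc)
      unfold flipAux
      rw [List.rdropWhile_concat_pos _ _ _ (by simp)]
      by_cases hst : q.rdropWhile (· == '0') = []
      · simp [hst, List.replicate_succ']
      · have hle : (q.rdropWhile (· == '0')).length ≤ q.length :=
          (List.rdropWhile_prefix _ _).length_le
        rw [if_neg hst]
        simp only [List.length_append, List.length_cons, List.length_nil]
        have h4 : q.length + 1 - (q.rdropWhile (· == '0')).length
            = (q.length - (q.rdropWhile (· == '0')).length) + 1 := by omega
        rw [h4]
        simp [List.replicate_succ', List.append_assoc]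
        intro hall
        exact absurd (List.rdropWhile_eq_nil_iff.mpr (fun x hx => by simp [hall x hx])) hst
    · dsimp only
      rw [if_neg hc]
      by_cases hq : q = []
      · subst hq
        have hmsb : rest.length + 1 = (([] ++ [c]) ++ rest).length := by simp
        rw [if_pos hmsb]
        rw [bitFlipLoop]
        rw [if_neg (by omega)]
        unfold flipAux
        rw [List.rdropWhile_concat_neg _ _ _ (by simpa using hc)]
        simp
      · have hmsb : ¬ (rest.length + 1 = ((q ++ [c]) ++ rest).length) := by
          have : q.length ≠ 0 := by simpa using hq
          omega
        rw [if_neg hmsb]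
        have hsl : PySem.List.slice ((q ++ [c]) ++ rest) none (some (-((rest.length : Int) + 1)))
            = q := by
          have h1 : (-((rest.length : Int) + 1)) = -(((rest.length + 1 : Nat) : Int)) := by
            push_cast; ring
          rw [h1, PySem.List.slice_to_neg_natCast _ (rest.length + 1) (by omega)]
          have h2 : ((q ++ [c]) ++ rest).length - (rest.length + 1) = q.length := by omega
          rw [h2, List.append_assoc, List.take_left]
        rw [hsl]
        unfold flipAux
        rw [List.rdropWhile_concat_neg _ _ _ (by simpa using hc)]
        simp [hq]

-- ===== VERDICT (by name: the statement is the Claim_ definition above) =====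
theorem bit_flip_spec : Claim_equal_bit_flip := by
  intro s _
  show bit_flip s = bit_flip_alt s
  unfold bit_flip bit_flip_alt
  have h := loop_eq s.toList [] [] (by simp)
  simp only [List.append_nil, List.length_nil] at h
  rw [h]
  unfold flipAux
  by_cases hst : s.toList.rdropWhile (· == '0') = [] <;> simp [hst]
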